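-- pv_equiv track=rewrite | github.com/vmasrani/machine_learning_helpers | job_submitter.py | make_hyper_string_from_dict
-- ===== SOURCE A (Python) =====
-- import itertools
--
-- def make_hyper_string_from_dict(hyper_dict):
--     # Check all values are iterable lists
--     def type_check(value):
--         if isinstance(value, (list, range)):
--             return list(value)
--         else:
--             return [value]
--
--     hyper_dict = {key: type_check(value) for key, value in hyper_dict.items()}
--
--     commands = []
--     for args in itertools.product(*hyper_dict.values()):
--         command = "".join(["'{}={}' ".format(k, v) for k, v in zip(hyper_dict.keys(), args)])
--         commands.append(command[:-1])
--
--     return commands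
-- ===== SOURCE B (Python) =====
-- def make_hyper_string_from_dict(hyper_dict):
--     def type_check(value):
--         if isinstance(value, (list, range)):
--             return list(value)
--         else:
--             return [value]
--
--     parts = [""]
--     for key, value in hyper_dict.items():
--         parts = [p + "'{}={}' ".format(key, v)
--                  for p in parts for v in type_check(value)]
--     return [p[:-1] for p in parts]
-- ===== Notes on version B (the rewrite author's own statement) =====
-- stated objective: alternative
-- what changed: Replaces itertools.product over values followed by a zip-with-keys join per combination with an incremental fold that grows the command strings directly, one key at a time, so no tuple of values or zip/join step is ever built.
import Mathlib
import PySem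

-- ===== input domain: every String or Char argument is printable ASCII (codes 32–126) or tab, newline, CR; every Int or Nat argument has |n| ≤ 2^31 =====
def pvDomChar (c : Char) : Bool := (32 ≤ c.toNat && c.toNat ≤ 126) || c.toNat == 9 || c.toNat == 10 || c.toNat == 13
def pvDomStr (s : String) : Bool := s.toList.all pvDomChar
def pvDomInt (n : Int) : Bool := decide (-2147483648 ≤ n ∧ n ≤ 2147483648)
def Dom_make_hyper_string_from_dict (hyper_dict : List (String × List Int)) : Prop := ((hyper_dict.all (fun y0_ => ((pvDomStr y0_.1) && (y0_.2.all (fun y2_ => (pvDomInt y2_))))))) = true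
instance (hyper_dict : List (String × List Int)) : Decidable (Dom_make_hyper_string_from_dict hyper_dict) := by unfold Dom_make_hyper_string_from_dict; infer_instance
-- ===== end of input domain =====

-- B folds the Cartesian product into the command strings directly (one key at a time) instead of
-- materialising value tuples with itertools.product and join-zipping each with the keys; same cost, different decomposition.
-- (On this typed domain every dict value is already a list, so A's `type_check` normalisation is the identity.)

-- ===== PORT A =====
-- itertools.product(*values): first value-list varies slowest, last fastest
def pvProduct : List (List Int) → List (List Int)
  | [] => [[]]
  | vs :: rest => vs.flatMap (fun v => (pvProduct rest).map (fun args => v :: args))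

def make_hyper_string_from_dict (hyper_dict : List (String × List Int)) : List String :=
  (pvProduct (hyper_dict.map Prod.snd)).foldl
    (fun commands args =>
      commands ++ [PySem.Str.slice
        (PySem.Str.join "" (((hyper_dict.map Prod.fst).zip args).map
          (fun kv => "'" ++ kv.1 ++ "=" ++ PySem.Int.toStr kv.2 ++ "' ")))
        none (some (-1))]) []

-- ===== PORT B =====
def make_hyper_string_from_dict_alt (hyper_dict : List (String × List Int)) : List String :=
  (hyper_dict.foldl
    (fun parts kv =>
      parts.flatMap (fun p => kv.2.map (fun v => p ++ ("'" ++ kv.1 ++ "=" ++ PySem.Int.toStr v ++ "' "))))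
    [""]).map (fun p => PySem.Str.slice p none (some (-1)))

-- ===== PRECONDITION & SPEC =====
def Spec_make_hyper_string_from_dict (hyper_dict : List (String × List Int)) (out : List String) : Prop := out = make_hyper_string_from_dict_alt hyper_dict
instance (hyper_dict : List (String × List Int)) (out : List String) : Decidable (Spec_make_hyper_string_from_dict hyper_dict out) := by unfold Spec_make_hyper_string_from_dict; infer_instance

-- ===== CLAIM (what is proved, stated in full; the proofs are below) =====
def Claim_equal_make_hyper_string_from_dict : Prop := ∀ (hyper_dict : List (String × List Int)), Dom_make_hyper_string_from_dict hyper_dict → Spec_make_hyper_string_from_dict hyper_dict (make_hyper_string_from_dict hyper_dict)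

-- ===== LEMMAS AND PROOFS =====

-- ''.join over a cons (empty separator just concatenates)
theorem pv_join_empty_cons (x : String) (xs : List String) :
    PySem.Str.join "" (x :: xs) = x ++ PySem.Str.join "" xs := by
  have h : ∀ (c : List Char) (r : List (List Char)),
      PySem.Chars.join [] (c :: r) = c ++ PySem.Chars.join [] r := by
    intro c r
    cases r <;> simp [PySem.Chars.join, List.intercalate, List.intersperse]
  simp [PySem.Str.join, h]

-- the zipped-and-joined command string, as A builds it
def pvJoin (keys : List String) (args : List Int) : String :=
  PySem.Str.join "" ((keys.zip args).map
    (fun kv => "'" ++ kv.1 ++ "=" ++ PySem.Int.toStr kv.2 ++ "' "))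

theorem pvJoin_nil : pvJoin [] [] = "" := by
  simp [pvJoin, PySem.Str.join, PySem.Chars.join, List.intercalate]

theorem pvJoin_cons (k : String) (ks : List String) (v : Int) (vs : List Int) :
    pvJoin (k :: ks) (v :: vs) = ("'" ++ k ++ "=" ++ PySem.Int.toStr v ++ "' ") ++ pvJoin ks vs := by
  simp [pvJoin, List.zip_cons_cons, pv_join_empty_cons]

-- the fold of B equals: each accumulated prefix extended by every full combination's command string
theorem pv_fold_eq (l : List (String × List Int)) (acc : List String) :
    l.foldl (fun parts kv =>
        parts.flatMap (fun p => kv.2.map (fun v => p ++ ("'" ++ kv.1 ++ "=" ++ PySem.Int.toStr v ++ "' ")))) acc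
      = acc.flatMap (fun p => (pvProduct (l.map Prod.snd)).map (fun args => p ++ pvJoin (l.map Prod.fst) args)) := by
  induction l generalizing acc with
  | nil => simp [pvProduct, pvJoin_nil]
  | cons kv t ih =>
    simp only [List.foldl_cons, ih, List.map_cons, pvProduct]
    rw [List.flatMap_assoc]
    refine List.flatMap_congr (fun p _ => ?_)
    simp only [List.flatMap_map, List.map_flatMap, List.map_map, Function.comp_def]
    refine List.flatMap_congr (fun v _ => ?_)
    simp [pvJoin_cons, String.append_assoc]

-- ===== VERDICT (by name: the statement is the Claim_ definition above) =====
theorem make_hyper_string_from_dict_spec : Claim_equal_make_hyper_string_from_dict := by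
  intro hd _
  show make_hyper_string_from_dict hd = make_hyper_string_from_dict_alt hd
  rw [make_hyper_string_from_dict, make_hyper_string_from_dict_alt,
      PySem.List.foldl_append_singleton_eq_map, pv_fold_eq]
  simp [pvJoin]
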